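-- pv_equiv track=rewrite | github.com/Vanshikagarwal1901/Time-Complexity-Analsyer-Compiler-Design | src/tca/parsers/c_parser.py | _split_for_header
-- ===== SOURCE A (Python) =====
-- from typing import List, Optional, Tuple
--
-- def _split_for_header(header: List[str]) -> Tuple[List[str], List[str], List[str]]:
--     parts: List[List[str]] = [[], [], []]
--     idx = 0
--     for tok in header:
--         if tok == ";" and idx < 2:
--             idx += 1
--             continue
--         parts[idx].append(tok)
--     return parts[0], parts[1], parts[2]
-- ===== SOURCE B (Python) =====
-- from typing import List, Tuple
--
-- def _split_for_header(header: List[str]) -> Tuple[List[str], List[str], List[str]]: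
--     try:
--         i = header.index(";")
--     except ValueError:
--         return list(header), [], []
--     try:
--         j = header.index(";", i + 1)
--     except ValueError:
--         return header[:i], header[i + 1:], []
--     return header[:i], header[i + 1:j], header[j + 1:]
-- ===== Notes on version B (the rewrite author's own statement) =====
-- stated objective: simpler
-- what changed: B locates the first two ';' indices and returns three slices of the list, instead of A's token-by-token loop accumulating into a bucket selected by a mutable index.
import Mathlib
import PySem

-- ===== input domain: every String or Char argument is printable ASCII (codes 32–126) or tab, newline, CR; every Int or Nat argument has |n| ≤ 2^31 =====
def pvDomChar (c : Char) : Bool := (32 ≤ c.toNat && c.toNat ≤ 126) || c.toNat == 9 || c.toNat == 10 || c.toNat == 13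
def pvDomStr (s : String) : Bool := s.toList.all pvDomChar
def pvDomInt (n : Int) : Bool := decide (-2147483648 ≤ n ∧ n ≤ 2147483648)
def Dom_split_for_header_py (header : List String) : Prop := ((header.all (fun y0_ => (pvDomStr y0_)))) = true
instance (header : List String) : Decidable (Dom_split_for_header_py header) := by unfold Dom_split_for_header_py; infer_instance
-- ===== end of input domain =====

-- B slices the list at the first two ';' indices instead of A's token loop with a mutable bucket index (objective: simpler).

-- ===== PORT A =====
-- state: the three buckets and the current bucket index; one step per token, as in A's loop
def pvStepA (st : (List String × List String × List String) × Nat) (tok : String) :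
    (List String × List String × List String) × Nat :=
  let ((p0, p1, p2), idx) := st
  if tok == ";" ∧ idx < 2 then ((p0, p1, p2), idx + 1)
  else match idx with
    | 0 => ((p0 ++ [tok], p1, p2), idx)
    | 1 => ((p0, p1 ++ [tok], p2), idx)
    | _ => ((p0, p1, p2 ++ [tok]), idx)

def split_for_header_py (header : List String) : List String × List String × List String :=
  (header.foldl pvStepA (([], [], []), 0)).1

-- ===== PORT B =====
-- header.index(";") / header.index(";", i+1) ported as findIdx? on the list / on the tail after i
def split_for_header_py_alt (header : List String) : List String × List String × List String :=
  match header.findIdx? (· == ";") with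
  | none => (header, [], [])
  | some i =>
    let rest := header.drop (i + 1)
    match rest.findIdx? (· == ";") with
    | none => (header.take i, rest, [])
    | some j => (header.take i, rest.take j, rest.drop (j + 1))

-- ===== PRECONDITION & SPEC =====
def Spec_split_for_header_py (header : List String) (out : List String × List String × List String) : Prop := out = split_for_header_py_alt header
instance (header : List String) (out : List String × List String × List String) : Decidable (Spec_split_for_header_py header out) := by unfold Spec_split_for_header_py; infer_instance

-- ===== CLAIM (what is proved, stated in full; the proofs are below) =====
def Claim_equal_split_for_header_py : Prop := ∀ (header : List String), Dom_split_for_header_py header → Spec_split_for_header_py header (split_for_header_py header)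

-- ===== LEMMAS AND PROOFS =====

-- bucket 2: every remaining token is appended to p2
lemma pvFoldA2 (header : List String) (p0 p1 p2 : List String) :
    header.foldl pvStepA ((p0, p1, p2), 2) = ((p0, p1, p2 ++ header), 2) := by
  induction header generalizing p2 with
  | nil => simp
  | cons t ts ih =>
    have hc : ¬((t == ";") = true ∧ (2:Nat) < 2) := fun h => absurd h.2 (by omega)
    simp only [List.foldl_cons, pvStepA, if_neg hc]
    simpa using ih (p2 ++ [t])

-- bucket 1: fold from idx = 1 splits the remainder at its first ';'
lemma pvFoldA1 (header : List String) (p0 p1 : List String) :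
    header.foldl pvStepA ((p0, p1, []), 1) =
      match header.findIdx? (· == ";") with
      | none => ((p0, p1 ++ header, []), 1)
      | some j => ((p0, p1 ++ header.take j, header.drop (j + 1)), 2) := by
  induction header generalizing p1 with
  | nil => simp
  | cons t ts ih =>
    by_cases ht : t = ";"
    · subst ht
      simp only [List.foldl_cons, pvStepA, List.findIdx?_cons]
      simpa using pvFoldA2 ts p0 p1 []
    · have ht' : (t == ";") = false := by simpa using ht
      have hc : ¬((t == ";") = true ∧ (1:Nat) < 2) := by simp [ht']
      simp only [List.foldl_cons, pvStepA, List.findIdx?_cons, if_neg hc]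
      rw [ih (p1 ++ [t])]
      cases h : ts.findIdx? (· == ";") with
      | none => simp [ht']
      | some j => simp [ht']

-- bucket 0: fold from the initial state splits at the first ';', then continues in bucket 1
lemma pvFoldA0 (header : List String) (p0 : List String) :
    header.foldl pvStepA ((p0, [], []), 0) =
      match header.findIdx? (· == ";") with
      | none => ((p0 ++ header, [], []), 0)
      | some i => (header.drop (i + 1)).foldl pvStepA ((p0 ++ header.take i, [], []), 1) := by
  induction header generalizing p0 with
  | nil => simp
  | cons t ts ih =>
    by_cases ht : t = ";"
    · subst ht
      simp only [List.foldl_cons, pvStepA, List.findIdx?_cons]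
      simp
    · have ht' : (t == ";") = false := by simpa using ht
      have hc : ¬((t == ";") = true ∧ (0:Nat) < 2) := by simp [ht']
      simp only [List.foldl_cons, pvStepA, List.findIdx?_cons, if_neg hc]
      rw [ih (p0 ++ [t])]
      cases h : ts.findIdx? (· == ";") with
      | none => simp [ht']
      | some i => simp [ht']

-- ===== VERDICT (by name: the statement is the Claim_ definition above) =====
theorem split_for_header_py_spec : Claim_equal_split_for_header_py := by
  intro header _
  show split_for_header_py header = split_for_header_py_alt header
  unfold split_for_header_py split_for_header_py_alt
  rw [pvFoldA0 header []]
  cases h : header.findIdx? (· == ";") with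
  | none => simp
  | some i =>
    simp only
    rw [pvFoldA1]
    cases h2 : (header.drop (i + 1)).findIdx? (· == ";") with
    | none => simp
    | some j => simp
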